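-- pv_equiv track=rewrite | github.com/DinsonDamienWBD/DataWarehouse | .planning/fix_missing_angle.py | count_angles
-- ===== SOURCE A (Python) =====
-- def count_angles(s):
--     """Count unmatched opening angle brackets in string."""
--     depth = 0
--     for c in s:
--         if c == '<':
--             depth += 1
--         elif c == '>':
--             depth -= 1
--     return depth
-- ===== SOURCE B (Python) =====
-- def count_angles(s):
--     """Count unmatched opening angle brackets in string."""
--     n = len(s)
--     if n == 0:
--         return 0
--     if n == 1:
--         return 1 if s == '<' else (-1 if s == '>' else 0)
--     m = n // 2
--     return count_angles(s[:m]) + count_angles(s[m:])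
-- ===== Notes on version B (the rewrite author's own statement) =====
-- stated objective: alternative
-- what changed: Replaces A's single left-to-right depth-accumulating loop with a divide-and-conquer recursion: split the string at its midpoint, recursively compute the net depth of each half, and add the two results (a singleton is judged directly); correct because net bracket depth is additive over concatenation.
import Mathlib
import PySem

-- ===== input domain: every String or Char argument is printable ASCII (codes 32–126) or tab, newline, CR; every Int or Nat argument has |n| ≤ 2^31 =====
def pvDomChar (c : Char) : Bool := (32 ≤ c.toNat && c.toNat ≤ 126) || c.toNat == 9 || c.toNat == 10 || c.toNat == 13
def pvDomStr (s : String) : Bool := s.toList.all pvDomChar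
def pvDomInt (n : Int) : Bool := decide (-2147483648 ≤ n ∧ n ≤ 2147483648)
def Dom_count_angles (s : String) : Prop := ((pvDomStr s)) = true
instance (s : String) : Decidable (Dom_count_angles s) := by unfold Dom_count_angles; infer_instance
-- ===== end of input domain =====

-- B replaces A's single depth-accumulating loop with a midpoint divide-and-conquer recursion (net depth is additive over concatenation); same O(n) cost.


-- ===== PORT A =====
def count_angles (s : String) : Int :=
  s.toList.foldl (fun depth c =>
    if c == '<' then depth + 1
    else if c == '>' then depth - 1
    else depth) 0

-- ===== PORT B =====
-- Source B's recursion over the characters; s[:m] / s[m:] with 0 ≤ m ≤ n are exactly take/drop.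
def count_angles_altGo : List Char → Int
  | [] => 0
  | [c] => if c == '<' then 1 else if c == '>' then -1 else 0
  | a :: b :: t =>
      let m := (a :: b :: t).length / 2
      count_angles_altGo ((a :: b :: t).take m) +
        count_angles_altGo ((a :: b :: t).drop m)
termination_by l => l.length
decreasing_by
  · simp [List.length_take]; omega
  · simp [List.length_drop]; omega

def count_angles_alt (s : String) : Int := count_angles_altGo s.toList

-- ===== PRECONDITION & SPEC =====
def Spec_count_angles (s : String) (out : Int) : Prop := out = count_angles_alt s
instance (s : String) (out : Int) : Decidable (Spec_count_angles s out) := by unfold Spec_count_angles; infer_instance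

-- ===== CLAIM (what is proved, stated in full; the proofs are below) =====
def Claim_equal_count_angles : Prop := ∀ (s : String), Dom_count_angles s → Spec_count_angles s (count_angles s)

-- ===== LEMMAS AND PROOFS =====

-- A's loop computes (#'<') − (#'>')
theorem foldl_depth (l : List Char) :
    ∀ (a : Int),
      l.foldl (fun depth c =>
        if c == '<' then depth + 1
        else if c == '>' then depth - 1
        else depth) a = a + (l.count '<' : Int) - (l.count '>' : Int) := by
  induction l with
  | nil => intro a; simp
  | cons h t ih =>
    intro a
    simp only [List.foldl_cons, ih, List.count_cons]
    by_cases h1 : h = '<'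
    · simp [h1]; ring
    · by_cases h2 : h = '>'
      · simp [h2]; ring
      · simp [h1, h2]

-- B's divide-and-conquer computes the same quantity (additivity of counts over the take/drop split)
theorem altGo_eq_counts_fuel :
    ∀ (n : Nat) (l : List Char), l.length ≤ n →
      count_angles_altGo l = (l.count '<' : Int) - (l.count '>' : Int) := by
  intro n
  induction n with
  | zero =>
    intro l hl
    have : l = [] := List.eq_nil_of_length_eq_zero (Nat.le_zero.mp hl)
    subst this; simp [count_angles_altGo]
  | succ n ih =>
    intro l hl
    match l with
    | [] => simp [count_angles_altGo]
    | [c] =>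
      rw [count_angles_altGo]
      by_cases h1 : c = '<'
      · simp [h1]
      · by_cases h2 : c = '>'
        · simp [h2]
        · simp [h1, h2]
    | a :: b :: t =>
      rw [count_angles_altGo]
      have hm1 : ((a :: b :: t).take ((a :: b :: t).length / 2)).length ≤ n := by
        simp only [List.length_take, List.length_cons] at hl ⊢
        omega
      have hm2 : ((a :: b :: t).drop ((a :: b :: t).length / 2)).length ≤ n := by
        simp only [List.length_drop, List.length_cons] at hl ⊢
        omega
      rw [ih _ hm1, ih _ hm2]
      have h := List.take_append_drop ((a :: b :: t).length / 2) (a :: b :: t)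
      have h1 := congrArg (List.count '<') h
      have h2 := congrArg (List.count '>') h
      rw [List.count_append] at h1 h2
      push_cast [← h1, ← h2]
      ring

theorem altGo_eq_counts (l : List Char) :
    count_angles_altGo l = (l.count '<' : Int) - (l.count '>' : Int) :=
  altGo_eq_counts_fuel l.length l le_rfl

-- ===== VERDICT (by name: the statement is the Claim_ definition above) =====
theorem count_angles_spec : Claim_equal_count_angles := by
  intro s _
  unfold Spec_count_angles count_angles count_angles_alt
  rw [foldl_depth, altGo_eq_counts]
  ring
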